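-- pv_equiv track=rewrite | github.com/theXYZT/codejam-2021 | Round 1B/broken-clock.py | solve
-- ===== SOURCE A (Python) =====
-- import itertools
--
-- MAX_TICKS = 3600*12*10**9
--
-- HOUR = MAX_TICKS // 12
--
-- MIN = HOUR // 60
--
-- SEC = MIN // 60
--
-- def time_to_hms(n):
--     h, n = n // HOUR, n % HOUR
--     m, n = n // MIN, n % MIN
--     s, n = n // SEC, n % SEC
--     return h, m, s, n % SEC
--
-- def solve(A, B, C):
--     for H, M, S in itertools.permutations([A, B, C], 3):
--         for h in range(12):
--             X = h * HOUR + M - H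
--             if X % 11 == 0:
--                 T = (h * HOUR + (X // 11)) % MAX_TICKS
--                 M_valid = (M == (11*T + H) % MAX_TICKS)
--                 S_valid = (S == (719*T + H) % MAX_TICKS)
--
--                 if M_valid and S_valid:
--                     return time_to_hms(T)
-- ===== SOURCE B (Python) =====
-- MAX_TICKS = 3600*12*10**9
--
-- HOUR = MAX_TICKS // 12
--
-- MIN = HOUR // 60
--
-- SEC = MIN // 60
--
-- # modular inverse of 11 mod MAX_TICKS (gcd(11, MAX_TICKS) = 1)
-- INV11 = pow(11, -1, MAX_TICKS)
--
--
-- def good(p):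
--     H, M, S = p
--     # 11*T = M - H (mod MAX_TICKS) has the unique closed-form solution:
--     T = ((M - H) * INV11) % MAX_TICKS
--     return M == (11*T + H) % MAX_TICKS and S == (719*T + H) % MAX_TICKS
--
--
-- def solve(A, B, C):
--     perms = [(A, B, C), (A, C, B), (B, A, C), (B, C, A), (C, A, B), (C, B, A)]
--     hit = next((p for p in perms if good(p)), None)
--     if hit is None:
--         return None
--     H, M, _ = hit
--     T = ((M - H) * INV11) % MAX_TICKS
--     s, ns = divmod(T, SEC)
--     m, s = divmod(s, 60)
--     h, m = divmod(m, 60)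
--     return h, m, s, ns
-- ===== Notes on version B (the rewrite author's own statement) =====
-- stated objective: simpler
-- what changed: A's nested loops (each permutation times a 12-step search for a T with 11*T = M-H mod MAX_TICKS) become a single find-first over the six role assignments using the closed-form T = ((M-H)*pow(11,-1,MAX_TICKS)) % MAX_TICKS, and the found time is split into h,m,s,ns bottom-up with divmod instead of A's top-down // and % chain.
import Mathlib
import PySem

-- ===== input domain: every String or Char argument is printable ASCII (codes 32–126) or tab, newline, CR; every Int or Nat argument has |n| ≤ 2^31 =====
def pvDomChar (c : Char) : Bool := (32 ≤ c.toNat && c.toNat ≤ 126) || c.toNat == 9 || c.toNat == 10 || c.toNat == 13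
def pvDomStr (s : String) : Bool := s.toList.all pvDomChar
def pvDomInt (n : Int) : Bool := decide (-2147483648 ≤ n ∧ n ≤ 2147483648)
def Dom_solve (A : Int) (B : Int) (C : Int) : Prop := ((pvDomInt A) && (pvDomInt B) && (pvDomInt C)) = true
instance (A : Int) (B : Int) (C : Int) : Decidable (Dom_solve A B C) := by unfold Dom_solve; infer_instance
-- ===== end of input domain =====

-- B (objective: simpler) replaces A's nested loops (permutations × 12-step search for T) by a
-- find-first over the six role assignments with the closed-form T = ((M-H)*pow(11,-1,MAX)) % MAX,
-- and unpacks the found time bottom-up with divmod instead of A's top-down // and % chain.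

-- ===== PORT A =====
def pvMAX : Int := 43200000000000    -- MAX_TICKS = 3600*12*10**9
def pvHOUR : Int := 3600000000000    -- HOUR = MAX_TICKS // 12
def pvMIN : Int := 60000000000       -- MIN = HOUR // 60
def pvSEC : Int := 1000000000        -- SEC = MIN // 60

def pv_tms (n : Int) : Int × Int × Int × Int :=
  let h := PySem.Int.floordiv n pvHOUR; let n1 := PySem.Int.mod n pvHOUR
  let m := PySem.Int.floordiv n1 pvMIN; let n2 := PySem.Int.mod n1 pvMIN
  let s := PySem.Int.floordiv n2 pvSEC; let n3 := PySem.Int.mod n2 pvSEC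
  (h, m, s, PySem.Int.mod n3 pvSEC)

-- inner `for h in range(12)` loop of A (early return = some, fall-through = none → continue)
def pv_innerA (H M S : Int) : List Int → Option (Int × Int × Int × Int)
  | [] => none
  | h :: rest =>
    let X := h * pvHOUR + M - H
    if PySem.Int.mod X 11 == 0 then
      let T := PySem.Int.mod (h * pvHOUR + PySem.Int.floordiv X 11) pvMAX
      let Mv := M == PySem.Int.mod (11 * T + H) pvMAX
      let Sv := S == PySem.Int.mod (719 * T + H) pvMAX
      if Mv && Sv then some (pv_tms T) else pv_innerA H M S rest
    else pv_innerA H M S rest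

-- outer loop over itertools.permutations([A,B,C], 3) (documented iteration order)
def pv_permLoopA : List (Int × Int × Int) → Option (Int × Int × Int × Int)
  | [] => none
  | (H, M, S) :: rest =>
    match pv_innerA H M S (PySem.List.pyRange 0 12 1) with
    | some r => some r
    | none => pv_permLoopA rest

def solve (A : Int) (B : Int) (C : Int) : Option (Int × Int × Int × Int) :=
  pv_permLoopA [(A, B, C), (A, C, B), (B, A, C), (B, C, A), (C, A, B), (C, B, A)]

-- ===== PORT B =====
-- INV11 = pow(11, -1, MAX_TICKS); the Python stdlib call ported as its (exact) literal value
def pvINV11 : Int := 15709090909091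

-- Source B's `good(p)`: does this role assignment (H, M, S) fit?
def pvGood (p : Int × Int × Int) : Bool :=
  let T := PySem.Int.mod ((p.2.1 - p.1) * pvINV11) pvMAX
  (p.2.1 == PySem.Int.mod (11 * T + p.1) pvMAX) && (p.2.2 == PySem.Int.mod (719 * T + p.1) pvMAX)

def solve_alt (A : Int) (B : Int) (C : Int) : Option (Int × Int × Int × Int) :=
  let perms : List (Int × Int × Int) := [(A,B,C), (A,C,B), (B,A,C), (B,C,A), (C,A,B), (C,B,A)]
  -- next((p for p in perms if good(p)), None)
  match perms.find? pvGood with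
  | none => none
  | some (H, M, _) =>
    let T := PySem.Int.mod ((M - H) * pvINV11) pvMAX
    -- divmod(x, d) with a nonzero literal divisor = (x // d, x % d): exact
    let s0 := PySem.Int.floordiv T pvSEC; let ns := PySem.Int.mod T pvSEC
    let m0 := PySem.Int.floordiv s0 60;   let s := PySem.Int.mod s0 60
    let h  := PySem.Int.floordiv m0 60;   let m := PySem.Int.mod m0 60
    some (h, m, s, ns)

-- ===== PRECONDITION & SPEC =====
def Spec_solve (A : Int) (B : Int) (C : Int) (out : Option (Int × Int × Int × Int)) : Prop := out = solve_alt A B C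
instance (A : Int) (B : Int) (C : Int) (out : Option (Int × Int × Int × Int)) : Decidable (Spec_solve A B C out) := by unfold Spec_solve; infer_instance

-- ===== CLAIM (what is proved, stated in full; the proofs are below) =====
def Claim_equal_solve : Prop := ∀ (A : Int) (B : Int) (C : Int), Dom_solve A B C → Spec_solve A B C (solve A B C)

-- ===== LEMMAS AND PROOFS =====

-- B's bottom-up divmod chain produces exactly A's top-down time_to_hms fields.
lemma pv_tms_eq_divmod (T : Int) :
    pv_tms T = (PySem.Int.floordiv (PySem.Int.floordiv (PySem.Int.floordiv T pvSEC) 60) 60,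
                PySem.Int.mod (PySem.Int.floordiv (PySem.Int.floordiv T pvSEC) 60) 60,
                PySem.Int.mod (PySem.Int.floordiv T pvSEC) 60,
                PySem.Int.mod T pvSEC) := by
  simp only [pv_tms, pvHOUR, pvMIN, pvSEC,
    PySem.Int.floordiv_eq_ediv_of_pos (by norm_num : (0:Int) < 3600000000000),
    PySem.Int.floordiv_eq_ediv_of_pos (by norm_num : (0:Int) < 60000000000),
    PySem.Int.floordiv_eq_ediv_of_pos (by norm_num : (0:Int) < 1000000000),
    PySem.Int.floordiv_eq_ediv_of_pos (by norm_num : (0:Int) < 60),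
    PySem.Int.mod_eq_emod_of_pos (by norm_num : (0:Int) < 3600000000000),
    PySem.Int.mod_eq_emod_of_pos (by norm_num : (0:Int) < 60000000000),
    PySem.Int.mod_eq_emod_of_pos (by norm_num : (0:Int) < 1000000000),
    PySem.Int.mod_eq_emod_of_pos (by norm_num : (0:Int) < 60)]
  refine Prod.ext ?_ (Prod.ext ?_ (Prod.ext ?_ ?_)) <;> simp only [] <;> omega

-- Any h that passes A's divisibility test yields exactly B's closed-form T.
lemma pv_T_eq (M H h : Int) (hc : PySem.Int.mod (h * pvHOUR + M - H) 11 = 0) :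
    PySem.Int.mod (h * pvHOUR + PySem.Int.floordiv (h * pvHOUR + M - H) 11) pvMAX
      = PySem.Int.mod ((M - H) * pvINV11) pvMAX := by
  have hdvd : (11 : Int) ∣ (h * pvHOUR + M - H) := (PySem.Int.mod_eq_zero_iff_dvd _ _).mp hc
  obtain ⟨q, hq⟩ := hdvd
  have hfd : PySem.Int.floordiv (h * pvHOUR + M - H) 11 = q := by
    rw [PySem.Int.floordiv_eq_ediv_of_pos (by norm_num), hq]
    exact Int.mul_ediv_cancel_left q (by norm_num)
  rw [hfd, PySem.Int.mod_eq_emod_of_pos (by norm_num [pvMAX]),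
      PySem.Int.mod_eq_emod_of_pos (by norm_num [pvMAX])]
  have key1 : 11 * (h * pvHOUR + q) = h * pvMAX + (M - H) := by
    have h12 : pvMAX = 12 * pvHOUR := by norm_num [pvMAX, pvHOUR]
    rw [h12]; linear_combination -hq
  have hi : (11 : Int) * pvINV11 = 4 * pvMAX + 1 := by norm_num [pvINV11, pvMAX]
  have key2 : 11 * ((h * pvHOUR + q) - (M - H) * pvINV11) = (h - 4 * (M - H)) * pvMAX := by
    linear_combination key1 - (M - H) * hi
  have hp : Prime (11 : Int) := by norm_num
  have hd11 : (11 : Int) ∣ (h - 4 * (M - H)) * pvMAX :=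
    ⟨(h * pvHOUR + q) - (M - H) * pvINV11, key2.symm⟩
  rcases hp.dvd_mul.mp hd11 with h1 | h2
  · obtain ⟨k, hk⟩ := h1
    have hx : (h * pvHOUR + q) - (M - H) * pvINV11 = k * pvMAX := by
      have h11 : (11 : Int) ≠ 0 := by norm_num
      apply mul_left_cancel₀ h11
      rw [key2, hk]; ring
    have hdv : pvMAX ∣ (M - H) * pvINV11 - (h * pvHOUR + q) := ⟨-k, by linear_combination -hx⟩
    exact Int.modEq_iff_dvd.mpr hdv
  · exfalso; norm_num [pvMAX] at h2

-- If B's predicate rejects (H, M, S), A's inner loop falls all the way through.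
lemma pv_innerA_of_bad (H M S : Int) (hv : pvGood (H, M, S) = false) :
    ∀ l : List Int, pv_innerA H M S l = none := by
  intro l
  induction l with
  | nil => rfl
  | cons h rest ih =>
    simp only [pvGood] at hv
    simp only [pv_innerA]
    by_cases hc : PySem.Int.mod (h * pvHOUR + M - H) 11 = 0
    · rw [if_pos (by simpa using hc), pv_T_eq M H h hc, hv, if_neg (by simp)]
      exact ih
    · rw [if_neg (by simpa using hc)]
      exact ih

-- If B's predicate accepts (H, M, S), A's inner loop returns pv_tms of the closed-form T.
lemma pv_innerA_of_good (H M S : Int) (hv : pvGood (H, M, S) = true) :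
    ∀ l : List Int, (∃ h ∈ l, PySem.Int.mod (h * pvHOUR + M - H) 11 = 0) →
      pv_innerA H M S l = some (pv_tms (PySem.Int.mod ((M - H) * pvINV11) pvMAX)) := by
  intro l
  induction l with
  | nil => rintro ⟨h, hmem, -⟩; exact absurd hmem (List.not_mem_nil)
  | cons h rest ih =>
    rintro ⟨h', hmem, hch'⟩
    simp only [pvGood] at hv
    simp only [pv_innerA]
    by_cases hc : PySem.Int.mod (h * pvHOUR + M - H) 11 = 0
    · rw [if_pos (by simpa using hc), pv_T_eq M H h hc, hv, if_pos rfl]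
    · rw [if_neg (by simpa using hc)]
      rcases List.mem_cons.mp hmem with rfl | hmem'
      · exact absurd hch' hc
      · exact ih ⟨h', hmem', hch'⟩

-- range(12) always contains a solution of the divisibility test.
lemma pv_exists_h (H M : Int) :
    ∃ h ∈ PySem.List.pyRange 0 12 1, PySem.Int.mod (h * pvHOUR + M - H) 11 = 0 := by
  refine ⟨PySem.Int.mod (4 * (M - H)) 11, ?_, ?_⟩
  · rw [PySem.List.mem_pyRange_one]
    have h1 := PySem.Int.mod_nonneg (4 * (M - H)) (b := 11) (by norm_num)
    have h2 := PySem.Int.mod_lt (4 * (M - H)) (b := 11) (by norm_num)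
    omega
  · rw [PySem.Int.mod_eq_emod_of_pos (by norm_num), PySem.Int.mod_eq_emod_of_pos (by norm_num)]
    simp only [pvHOUR]
    omega

-- A's inner loop over range(12) is exactly: pvGood decides, the closed-form T delivers.
lemma pv_inner_characterized (H M S : Int) :
    pv_innerA H M S (PySem.List.pyRange 0 12 1)
      = if pvGood (H, M, S) then some (pv_tms (PySem.Int.mod ((M - H) * pvINV11) pvMAX)) else none := by
  cases hv : pvGood (H, M, S) with
  | false => simpa using pv_innerA_of_bad H M S hv _
  | true => simpa using pv_innerA_of_good H M S hv _ (pv_exists_h H M)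

-- A's permutation loop = find-first with pvGood, then pv_tms of the closed-form T.
lemma pv_permLoop_eq_find (l : List (Int × Int × Int)) :
    pv_permLoopA l = (match l.find? pvGood with
      | none => none
      | some (H, M, _) => some (pv_tms (PySem.Int.mod ((M - H) * pvINV11) pvMAX))) := by
  induction l with
  | nil => rfl
  | cons p rest ih =>
    obtain ⟨H, M, S⟩ := p
    simp only [pv_permLoopA, pv_inner_characterized, List.find?]
    cases hv : pvGood (H, M, S) with
    | false => simpa using ih
    | true => simp

-- ===== VERDICT (by name: the statement is the Claim_ definition above) =====
theorem solve_spec : Claim_equal_solve := by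
  intro A B C _
  show solve A B C = solve_alt A B C
  simp only [solve, solve_alt, pv_permLoop_eq_find]
  cases hf : List.find? pvGood [(A,B,C), (A,C,B), (B,A,C), (B,C,A), (C,A,B), (C,B,A)] with
  | none => rfl
  | some p => obtain ⟨H, M, S⟩ := p; simp [pv_tms_eq_divmod]
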